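-- pv_equiv track=rewrite | github.com/MasiatHasin/CSE221-Algorithms-Lab-Summer2023 | CSE221LabAssignment04_Summer2023/task6.py | countdiamonds
-- ===== SOURCE A (Python) =====
-- def DFS_FloodFill(r, c, rows, cols, G):
--     if r < 0 or r >= rows or c < 0 or c >= cols or G[r][c] == '#':
--         return 0
--
--     count = 0
--     if G[r][c] == 'D':
--         count += 1
--
--     G[r][c] = '#'
--
--     count += DFS_FloodFill(r + 1, c, rows, cols, G)
--     count += DFS_FloodFill(r - 1, c, rows, cols, G)
--     count += DFS_FloodFill(r, c + 1, rows, cols, G)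
--     count += DFS_FloodFill(r, c - 1, rows, cols, G)
--
--     return count
--
-- def countdiamonds(rows, cols, G):
--     maxDiamonds = 0
--     for r in range(rows):
--         for c in range(cols):
--             if G[r][c] == '.':
--                 diamond = DFS_FloodFill(r, c, rows, cols, G)
--                 maxDiamonds = max(maxDiamonds, diamond)
--     return maxDiamonds
-- ===== SOURCE B (Python) =====
-- def countdiamonds(rows, cols, G):
--     # Iterative flood fill with an explicit stack instead of recursive DFS;
--     # mutates G in place exactly like the original (region cells become '#').
--     maxDiamonds = 0
--     for r in range(rows):
--         for c in range(cols):
--             if G[r][c] == '.':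
--                 count = 0
--                 stack = [(r, c)]
--                 while stack:
--                     i, j = stack.pop()
--                     if i < 0 or i >= rows or j < 0 or j >= cols or G[i][j] == '#':
--                         continue
--                     if G[i][j] == 'D':
--                         count += 1
--                     G[i][j] = '#'
--                     stack.append((i, j - 1))
--                     stack.append((i, j + 1))
--                     stack.append((i - 1, j))
--                     stack.append((i + 1, j))
--                 maxDiamonds = max(maxDiamonds, count)
--     return maxDiamonds
-- ===== Notes on version B (the rewrite author's own statement) =====
-- stated objective: alternative
-- what changed: Replaces the recursive DFS flood fill with an iterative flood fill over an explicit LIFO stack (pop a cell, guard, count, mark '#', push the four neighbours); the outer seed scan, running max and in-place grid mutation are kept.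
import Mathlib
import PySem

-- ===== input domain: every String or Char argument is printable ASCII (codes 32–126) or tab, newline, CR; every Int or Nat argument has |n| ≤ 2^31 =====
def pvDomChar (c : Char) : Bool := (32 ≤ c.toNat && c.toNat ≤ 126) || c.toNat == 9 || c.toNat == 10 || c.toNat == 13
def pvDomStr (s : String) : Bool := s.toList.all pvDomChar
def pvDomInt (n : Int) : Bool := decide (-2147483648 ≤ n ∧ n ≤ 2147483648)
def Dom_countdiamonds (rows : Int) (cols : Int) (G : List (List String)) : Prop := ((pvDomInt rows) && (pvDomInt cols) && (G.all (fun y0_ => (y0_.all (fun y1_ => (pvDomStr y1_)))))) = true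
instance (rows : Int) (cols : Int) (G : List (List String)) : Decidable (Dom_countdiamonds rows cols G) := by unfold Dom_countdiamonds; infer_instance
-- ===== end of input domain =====

-- B replaces A's recursive DFS flood fill by an iterative flood fill over an explicit stack
-- (alternative decomposition, same cost). Both programs mutate G in place identically
-- (the filled region becomes '#'); the equivalence proved here is about the RETURN value.

-- shared cell access helpers (both Pythons read/write G[r][c] the same way)
def pvCellGet (g : List (List String)) (r c : Int) : Option String :=
  (PySem.List.pyGet? g r).bind fun row => PySem.List.pyGet? row c

def pvCellSet (g : List (List String)) (r c : Int) (v : String) : List (List String) :=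
  match g[r.toNat]? with
  | none => g
  | some row => g.set r.toNat (row.set c.toNat v)

-- measure used by the iterative port's termination argument: number of non-'#' cells
-- inside the rows × cols window
def pvW (s : String) : Nat := if s == "#" then 0 else 1

def pvRowLive (cols : Int) (row : List String) : Nat := ((row.take cols.toNat).map pvW).sum

def pvLive (rows cols : Int) (g : List (List String)) : Nat :=
  ((g.take rows.toNat).map (pvRowLive cols)).sum

-- generic: replacing an in-window element by a strictly lighter one strictly decreases it
theorem pv_sum_map_take_set_lt {α : Type} (f : α → Nat) :
    ∀ (l : List α) (n R : Nat) (x : α), (hn : n < l.length) → n < R → f x < f l[n] →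
      (((l.set n x).take R).map f).sum < ((l.take R).map f).sum := by
  intro l
  induction l with
  | nil => intro n R x hn _ _; simp at hn
  | cons a t ih =>
    intro n R x hn hR hlt
    cases n with
    | zero =>
      cases R with
      | zero => omega
      | succ S =>
        simp only [List.getElem_cons_zero] at hlt
        simp only [List.set_cons_zero, List.take_succ_cons, List.map_cons, List.sum_cons]
        omega
    | succ k =>
      cases R with
      | zero => omega
      | succ S =>
        have h0 := ih k S x (by simpa using Nat.lt_of_succ_lt_succ hn) (by omega) (by simpa using hlt)
        simp only [List.set_cons_succ, List.take_succ_cons, List.map_cons, List.sum_cons]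
        omega

-- marking a live in-window cell strictly decreases the live count (termination of pvFlood)
theorem pvLive_cellSet_lt (rows cols : Int) (g : List (List String)) (i j : Int) (v : String)
    (hi0 : 0 ≤ i) (hi : i < rows) (hj0 : 0 ≤ j) (hj : j < cols)
    (hv : pvCellGet g i j = some v) (hne : v ≠ "#") :
    pvLive rows cols (pvCellSet g i j "#") < pvLive rows cols g := by
  have hg : PySem.List.pyGet? g i = g[i.toNat]? := PySem.List.pyGet?_of_nonneg g hi0
  unfold pvCellGet at hv
  rw [hg] at hv
  cases hrow : g[i.toNat]? with
  | none => rw [hrow] at hv; simp at hv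
  | some row =>
    rw [hrow] at hv
    simp only [Option.bind_some] at hv
    have hrowv : PySem.List.pyGet? row j = row[j.toNat]? := PySem.List.pyGet?_of_nonneg row hj0
    rw [hrowv] at hv
    have hjm : j.toNat < row.length := by
      by_contra hle
      rw [List.getElem?_eq_none (by omega)] at hv; simp at hv
    have hin : i.toNat < g.length := by
      by_contra hle
      rw [List.getElem?_eq_none (by omega)] at hrow; simp at hrow
    have hgv : g[i.toNat] = row := by
      have := List.getElem?_eq_getElem hin
      rw [hrow] at this; exact (Option.some.inj this).symm
    have hrowj : row[j.toNat] = v := by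
      have := List.getElem?_eq_getElem hjm
      rw [hv] at this; exact (Option.some.inj this).symm
    unfold pvCellSet
    rw [hrow]
    unfold pvLive
    apply pv_sum_map_take_set_lt _ _ _ _ _ hin (by omega)
    rw [hgv]
    unfold pvRowLive
    apply pv_sum_map_take_set_lt _ _ _ _ _ hjm (by omega)
    rw [hrowj]
    simp [pvW, hne]

-- ===== PORT A =====
-- fueled port of DFS_FloodFill; the fuel only totalizes the recursion (Python's recursion
-- depth is bounded by the number of window cells, see pvLive_le_bound below), it never
-- changes the computed value on admitted inputs.
def pvDFS : Nat → Int → Int → Int → Int → List (List String) → Int × List (List String)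
  | 0, _, _, _, _, g => (0, g)
  | fuel + 1, r, c, rows, cols, g =>
    if r < 0 ∨ rows ≤ r ∨ c < 0 ∨ cols ≤ c ∨ pvCellGet g r c = some "#" then (0, g)
    else
      let cnt : Int := if pvCellGet g r c = some "D" then 1 else 0
      let g1 := pvCellSet g r c "#"
      let p1 := pvDFS fuel (r + 1) c rows cols g1
      let p2 := pvDFS fuel (r - 1) c rows cols p1.2
      let p3 := pvDFS fuel r (c + 1) rows cols p2.2
      let p4 := pvDFS fuel r (c - 1) rows cols p3.2
      (cnt + p1.1 + p2.1 + p3.1 + p4.1, p4.2)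

def pvInnerA (rows cols r : Int) (cs : List Int) (s : Int × List (List String)) :
    Int × List (List String) :=
  cs.foldl (fun s c =>
    if pvCellGet s.2 r c = some "." then
      let p := pvDFS (rows.toNat * cols.toNat + 1) r c rows cols s.2
      (max s.1 p.1, p.2)
    else s) s

def countdiamonds (rows : Int) (cols : Int) (G : List (List String)) : Int :=
  ((PySem.List.pyRange 0 rows 1).foldl
    (fun s r => pvInnerA rows cols r (PySem.List.pyRange 0 cols 1) s) ((0 : Int), G)).1

-- ===== PORT B =====
-- iterative flood fill over an explicit stack (pop, guard, count, mark, push 4 neighbours).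
-- The 'none' disjunct only totalizes the guard (Python raises there; excluded by Pre_).
def pvFlood (rows cols : Int) (st : List (Int × Int)) (g : List (List String)) (count : Int) :
    Int × List (List String) :=
  match st with
  | [] => (count, g)
  | (i, j) :: rest =>
    if h : i < 0 ∨ rows ≤ i ∨ j < 0 ∨ cols ≤ j ∨ pvCellGet g i j = none ∨ pvCellGet g i j = some "#" then
      pvFlood rows cols rest g count
    else
      let cnt : Int := if pvCellGet g i j = some "D" then count + 1 else count
      pvFlood rows cols ((i + 1, j) :: (i - 1, j) :: (i, j + 1) :: (i, j - 1) :: rest)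
        (pvCellSet g i j "#") cnt
termination_by 5 * pvLive rows cols g + st.length
decreasing_by
  · simp
  · push_neg at h
    obtain ⟨h1, h2, h3, h4, h5, h6⟩ := h
    obtain ⟨v, hv⟩ := Option.ne_none_iff_exists'.mp h5
    have := pvLive_cellSet_lt rows cols g i j v (by omega) (by omega) (by omega) (by omega) hv
      (by rintro rfl; exact h6 hv)
    simp; omega

def pvInnerB (rows cols r : Int) (cs : List Int) (s : Int × List (List String)) :
    Int × List (List String) :=
  cs.foldl (fun s c =>
    if pvCellGet s.2 r c = some "." then
      let p := pvFlood rows cols [(r, c)] s.2 0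
      (max s.1 p.1, p.2)
    else s) s

def countdiamonds_alt (rows : Int) (cols : Int) (G : List (List String)) : Int :=
  ((PySem.List.pyRange 0 rows 1).foldl
    (fun s r => pvInnerB rows cols r (PySem.List.pyRange 0 cols 1) s) ((0 : Int), G)).1

-- ===== PRECONDITION & SPEC =====
-- Pre_ excludes exactly the grids on which Python A raises an IndexError: whenever both
-- window dimensions are positive every window cell G[r][c] (0 ≤ r < rows, 0 ≤ c < cols)
-- must exist.
def Pre_countdiamonds (rows : Int) (cols : Int) (G : List (List String)) : Prop :=
  0 < rows → 0 < cols →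
    rows ≤ (G.length : Int) ∧ ∀ row ∈ G.take rows.toNat, cols ≤ (row.length : Int)

instance (rows : Int) (cols : Int) (G : List (List String)) :
    Decidable (Pre_countdiamonds rows cols G) := by unfold Pre_countdiamonds; infer_instance

def pvWitness_countdiamonds : Int × Int × List (List String) :=
  (2, 2, [[".", "D"], ["#", "."]])

def Spec_countdiamonds (rows : Int) (cols : Int) (G : List (List String)) (out : Int) : Prop :=
  out = countdiamonds_alt rows cols G

instance (rows : Int) (cols : Int) (G : List (List String)) (out : Int) :
    Decidable (Spec_countdiamonds rows cols G out) := by unfold Spec_countdiamonds; infer_instance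

-- ===== CLAIM (what is proved, stated in full; the proofs are below) =====
def Claim_equal_countdiamonds : Prop :=
  ∀ (rows : Int) (cols : Int) (G : List (List String)), Dom_countdiamonds rows cols G →
    Pre_countdiamonds rows cols G → Spec_countdiamonds rows cols G (countdiamonds rows cols G)

-- ===== LEMMAS AND PROOFS =====

-- generic: replacing one element by a lighter one does not increase a windowed weight sum
theorem pv_sum_map_take_set_le {α : Type} (f : α → Nat) :
    ∀ (l : List α) (n R : Nat) (x : α), (∀ hn : n < l.length, f x ≤ f l[n]) →
      (((l.set n x).take R).map f).sum ≤ ((l.take R).map f).sum := by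
  intro l
  induction l with
  | nil => intro n R x _; simp
  | cons a t ih =>
    intro n R x h
    cases n with
    | zero =>
      cases R with
      | zero => simp
      | succ S =>
        have h0 := h (by simp)
        simp only [List.getElem_cons_zero] at h0
        simp only [List.set_cons_zero, List.take_succ_cons, List.map_cons, List.sum_cons]
        omega
    | succ k =>
      cases R with
      | zero => simp
      | succ S =>
        have h0 := ih k S x (fun hk => by simpa using h (by simpa using Nat.succ_lt_succ hk))
        simp only [List.set_cons_succ, List.take_succ_cons, List.map_cons, List.sum_cons]
        omega


-- marking any cell '#' never increases the live count (cited by proofs below)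
theorem pvLive_cellSet_le (rows cols : Int) (g : List (List String)) (i j : Int) :
    pvLive rows cols (pvCellSet g i j "#") ≤ pvLive rows cols g := by
  unfold pvCellSet
  cases hrow : g[i.toNat]? with
  | none => exact le_rfl
  | some row =>
    unfold pvLive
    apply pv_sum_map_take_set_le
    intro hn
    have hg : g[i.toNat] = row := by
      have := List.getElem?_eq_getElem hn
      rw [hrow] at this; exact (Option.some.inj this).symm
    rw [hg]
    unfold pvRowLive
    apply pv_sum_map_take_set_le
    intro hm
    simp [pvW]



-- window validity: every window cell exists; preserved by both programs
def pvValid (rows cols : Int) (g : List (List String)) : Prop :=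
  rows ≤ (g.length : Int) ∧
    ∀ n : Nat, n < rows.toNat → ∀ row, g[n]? = some row → cols ≤ (row.length : Int)

theorem pvCellGet_some (rows cols : Int) (g : List (List String)) (i j : Int)
    (hV : pvValid rows cols g) (hi0 : 0 ≤ i) (hi : i < rows) (hj0 : 0 ≤ j) (hj : j < cols) :
    ∃ v, pvCellGet g i j = some v := by
  obtain ⟨hlen, hrows⟩ := hV
  have hin : i.toNat < g.length := by omega
  have hrow : g[i.toNat]? = some g[i.toNat] := List.getElem?_eq_getElem hin
  have hcols := hrows i.toNat (by omega) _ hrow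
  have hjm : j.toNat < g[i.toNat].length := by omega
  refine ⟨g[i.toNat][j.toNat], ?_⟩
  unfold pvCellGet
  rw [PySem.List.pyGet?_of_nonneg g hi0, hrow]
  simp only [Option.bind_some]
  rw [PySem.List.pyGet?_of_nonneg _ hj0]
  exact List.getElem?_eq_getElem hjm

theorem pvValid_cellSet (rows cols : Int) (g : List (List String)) (i j : Int) (v : String)
    (hV : pvValid rows cols g) : pvValid rows cols (pvCellSet g i j v) := by
  obtain ⟨hlen, hrows⟩ := hV
  unfold pvCellSet
  cases hrow : g[i.toNat]? with
  | none => exact ⟨hlen, hrows⟩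
  | some row =>
    refine ⟨by simpa using hlen, ?_⟩
    intro n hn row' hrow'
    rw [List.getElem?_set] at hrow'
    by_cases hni : i.toNat = n
    · subst hni
      have hin : i.toNat < g.length := by
        by_contra hle
        rw [List.getElem?_eq_none (by omega)] at hrow; simp at hrow
      simp only [if_pos rfl, if_pos hin] at hrow'
      have := hrows i.toNat hn row hrow
      have hl : row'.length = row.length := by
        have := (Option.some.inj hrow').symm
        subst this; simp
      omega
    · rw [if_neg hni] at hrow'
      exact hrows n hn row' hrow'

theorem pvValid_dfs (rows cols : Int) :
    ∀ (f : Nat) (i j : Int) (g : List (List String)), pvValid rows cols g →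
      pvValid rows cols (pvDFS f i j rows cols g).2 := by
  intro f
  induction f with
  | zero => intro i j g hV; simpa [pvDFS] using hV
  | succ e ih =>
    intro i j g hV
    simp only [pvDFS]
    split
    · exact hV
    · exact ih _ _ _ (ih _ _ _ (ih _ _ _ (ih _ _ _ (pvValid_cellSet _ _ _ _ _ _ hV))))

theorem pvLive_dfs_le (rows cols : Int) :
    ∀ (f : Nat) (i j : Int) (g : List (List String)),
      pvLive rows cols (pvDFS f i j rows cols g).2 ≤ pvLive rows cols g := by
  intro f
  induction f with
  | zero => intro i j g; simp [pvDFS]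
  | succ e ih =>
    intro i j g
    simp only [pvDFS]
    split
    · exact le_rfl
    · exact le_trans (ih _ _ _) (le_trans (ih _ _ _) (le_trans (ih _ _ _)
        (le_trans (ih _ _ _) (pvLive_cellSet_le rows cols g i j))))

theorem pv_sum_map_pvW_le : ∀ l : List String, (l.map pvW).sum ≤ l.length := by
  intro l
  induction l with
  | nil => simp
  | cons a t ih => simp only [List.map_cons, List.sum_cons, List.length_cons]
                   have : pvW a ≤ 1 := by unfold pvW; split <;> omega
                   omega

theorem pv_sum_le_mul {α : Type} (C : Nat) (f : α → Nat) :
    ∀ l : List α, (∀ x ∈ l, f x ≤ C) → (l.map f).sum ≤ l.length * C := by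
  intro l
  induction l with
  | nil => simp
  | cons a t ih =>
    intro h
    simp only [List.map_cons, List.sum_cons, List.length_cons]
    have h1 := h a (by simp)
    have h2 := ih (fun x hx => h x (by simp [hx]))
    have : (t.length + 1) * C = t.length * C + C := by ring
    omega

theorem pvLive_le_bound (rows cols : Int) (g : List (List String)) :
    pvLive rows cols g ≤ rows.toNat * cols.toNat := by
  unfold pvLive
  have hrow : ∀ row ∈ g.take rows.toNat, pvRowLive cols row ≤ cols.toNat := by
    intro row _
    unfold pvRowLive
    exact le_trans (pv_sum_map_pvW_le _) (by simpa using List.length_take_le cols.toNat row)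
  calc ((g.take rows.toNat).map (pvRowLive cols)).sum
      ≤ (g.take rows.toNat).length * cols.toNat := pv_sum_le_mul _ _ _ hrow
    _ ≤ rows.toNat * cols.toNat :=
        Nat.mul_le_mul_right _ (by simpa using List.length_take_le rows.toNat g)

-- the heart: one stack cell processed iteratively equals one recursive DFS call
theorem pvMain (rows cols : Int) :
    ∀ f : Nat, ∀ g : List (List String), pvValid rows cols g → pvLive rows cols g ≤ f →
      ∀ (i j : Int) (st : List (Int × Int)) (acc : Int),
        pvFlood rows cols ((i, j) :: st) g acc =
          pvFlood rows cols st (pvDFS (f + 1) i j rows cols g).2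
            (acc + (pvDFS (f + 1) i j rows cols g).1) := by
  intro f
  induction f using Nat.strong_induction_on with
  | _ f IH =>
  intro g hV hle i j st acc
  by_cases hg : i < 0 ∨ rows ≤ i ∨ j < 0 ∨ cols ≤ j ∨ pvCellGet g i j = some "#"
  · rw [pvFlood]
    rw [dif_pos (by tauto)]
    simp only [pvDFS, if_pos hg, add_zero]
  · push_neg at hg
    obtain ⟨h1, h2, h3, h4, h5⟩ := hg
    obtain ⟨v, hv⟩ := pvCellGet_some rows cols g i j hV (by omega) (by omega) (by omega) (by omega)
    have hvne : v ≠ "#" := by rintro rfl; exact h5 hv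
    have hlt : pvLive rows cols (pvCellSet g i j "#") < pvLive rows cols g :=
      pvLive_cellSet_lt rows cols g i j v (by omega) (by omega) (by omega) (by omega) hv hvne
    obtain ⟨e, rfl⟩ : ∃ e, f = e + 1 := ⟨f - 1, by omega⟩
    have hguard : ¬(i < 0 ∨ rows ≤ i ∨ j < 0 ∨ cols ≤ j ∨
        pvCellGet g i j = none ∨ pvCellGet g i j = some "#") := by
      push_neg
      exact ⟨by omega, by omega, by omega, by omega, by simp [hv], h5⟩
    rw [pvFlood, dif_neg hguard]
    have hV1 := pvValid_cellSet rows cols g i j "#" hV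
    have hle1 : pvLive rows cols (pvCellSet g i j "#") ≤ e := by omega
    rw [IH e (by omega) _ hV1 hle1]
    set g1 := pvCellSet g i j "#" with hg1
    set p1 := pvDFS (e + 1) (i + 1) j rows cols g1 with hp1
    have hV2 := pvValid_dfs rows cols (e + 1) (i + 1) j g1 hV1
    have hle2 : pvLive rows cols p1.2 ≤ e := le_trans (pvLive_dfs_le rows cols _ _ _ _) hle1
    rw [IH e (by omega) _ hV2 hle2]
    set p2 := pvDFS (e + 1) (i - 1) j rows cols p1.2 with hp2
    have hV3 := pvValid_dfs rows cols (e + 1) (i - 1) j p1.2 hV2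
    have hle3 : pvLive rows cols p2.2 ≤ e := le_trans (pvLive_dfs_le rows cols _ _ _ _) hle2
    rw [IH e (by omega) _ hV3 hle3]
    set p3 := pvDFS (e + 1) i (j + 1) rows cols p2.2 with hp3
    have hV4 := pvValid_dfs rows cols (e + 1) i (j + 1) p2.2 hV3
    have hle4 : pvLive rows cols p3.2 ≤ e := le_trans (pvLive_dfs_le rows cols _ _ _ _) hle3
    rw [IH e (by omega) _ hV4 hle4]
    set p4 := pvDFS (e + 1) i (j - 1) rows cols p3.2 with hp4
    have hnot : ¬(i < 0 ∨ rows ≤ i ∨ j < 0 ∨ cols ≤ j ∨ pvCellGet g i j = some "#") := by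
      push_neg; exact ⟨by omega, by omega, by omega, by omega, h5⟩
    have hdfs1 : (pvDFS (e + 1 + 1) i j rows cols g).1 =
        (if pvCellGet g i j = some "D" then (1 : Int) else 0) + p1.1 + p2.1 + p3.1 + p4.1 := by
      simp only [hp4, hp3, hp2, hp1, hg1]
      conv_lhs => rw [pvDFS]
      rw [if_neg hnot]
    have hdfs2 : (pvDFS (e + 1 + 1) i j rows cols g).2 = p4.2 := by
      simp only [hp4, hp3, hp2, hp1, hg1]
      conv_lhs => rw [pvDFS]
      rw [if_neg hnot]
    rw [hdfs1, hdfs2]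
    congr 1
    by_cases hD : pvCellGet g i j = some "D" <;> simp [hD] <;> ring

theorem pvSeed (rows cols i j : Int) (g : List (List String)) (hV : pvValid rows cols g) :
    pvFlood rows cols [(i, j)] g 0 =
      pvDFS (rows.toNat * cols.toNat + 1) i j rows cols g := by
  rw [pvMain rows cols (rows.toNat * cols.toNat) g hV (pvLive_le_bound rows cols g) i j [] 0]
  rw [pvFlood]
  simp

theorem pvInner_eq (rows cols r : Int) :
    ∀ (cs : List Int) (s : Int × List (List String)), pvValid rows cols s.2 →
      pvInnerA rows cols r cs s = pvInnerB rows cols r cs s ∧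
        pvValid rows cols (pvInnerA rows cols r cs s).2 := by
  intro cs
  induction cs with
  | nil => intro s h; exact ⟨rfl, h⟩
  | cons c cs ih =>
    intro s h
    by_cases hc : pvCellGet s.2 r c = some "."
    · have hseed := pvSeed rows cols r c s.2 h
      have hstep : pvInnerA rows cols r (c :: cs) s =
          pvInnerA rows cols r cs
            (max s.1 (pvDFS (rows.toNat * cols.toNat + 1) r c rows cols s.2).1,
             (pvDFS (rows.toNat * cols.toNat + 1) r c rows cols s.2).2) := by
        simp [pvInnerA, hc]
      have hstepB : pvInnerB rows cols r (c :: cs) s =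
          pvInnerB rows cols r cs
            (max s.1 (pvDFS (rows.toNat * cols.toNat + 1) r c rows cols s.2).1,
             (pvDFS (rows.toNat * cols.toNat + 1) r c rows cols s.2).2) := by
        simp [pvInnerB, hc, hseed]
      rw [hstep, hstepB]
      exact ih _ (pvValid_dfs rows cols _ r c s.2 h)
    · have hstep : pvInnerA rows cols r (c :: cs) s = pvInnerA rows cols r cs s := by
        simp [pvInnerA, hc]
      have hstepB : pvInnerB rows cols r (c :: cs) s = pvInnerB rows cols r cs s := by
        simp [pvInnerB, hc]
      rw [hstep, hstepB]
      exact ih s h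

theorem pvScan_eq (rows cols : Int) (cs : List Int) :
    ∀ (rs : List Int) (s : Int × List (List String)), pvValid rows cols s.2 →
      rs.foldl (fun s r => pvInnerA rows cols r cs s) s =
        rs.foldl (fun s r => pvInnerB rows cols r cs s) s := by
  intro rs
  induction rs with
  | nil => intro s _; rfl
  | cons r rs ih =>
    intro s h
    obtain ⟨heq, hV⟩ := pvInner_eq rows cols r cs s h
    simp only [List.foldl_cons]
    rw [← heq]
    exact ih _ hV

theorem pvInnerA_nil (rows cols : Int) :
    ∀ (rs : List Int) (s : Int × List (List String)),
      rs.foldl (fun s r => pvInnerA rows cols r [] s) s = s := by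
  intro rs
  induction rs with
  | nil => intro s; rfl
  | cons r rs ih => intro s; simpa [pvInnerA] using ih s

theorem pvInnerB_nil (rows cols : Int) :
    ∀ (rs : List Int) (s : Int × List (List String)),
      rs.foldl (fun s r => pvInnerB rows cols r [] s) s = s := by
  intro rs
  induction rs with
  | nil => intro s; rfl
  | cons r rs ih => intro s; simpa [pvInnerB] using ih s

-- ===== VERDICT (by name: the statement is the Claim_ definition above) =====
theorem countdiamonds_spec : Claim_equal_countdiamonds := by
  intro rows cols G _hDom hPre
  unfold Spec_countdiamonds countdiamonds countdiamonds_alt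
  by_cases hr : 0 < rows
  · by_cases hcc : 0 < cols
    · obtain ⟨hlen, hrows⟩ := hPre hr hcc
      have hV : pvValid rows cols G := by
        refine ⟨hlen, ?_⟩
        intro n hn row hrow
        have hmem : row ∈ G := List.mem_of_getElem? hrow
        have hmemT : row ∈ G.take rows.toNat := by
          have hnG : n < G.length := by
            by_contra hle
            rw [List.getElem?_eq_none (by omega)] at hrow; simp at hrow
          have hrow' : G[n] = row := by
            rw [List.getElem?_eq_getElem hnG] at hrow
            exact Option.some.inj hrow
          have hnT : n < (G.take rows.toNat).length := by
            simp only [List.length_take]; omega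
          have hT : (G.take rows.toNat)[n] = row := by
            rw [List.getElem_take]; exact hrow'
          exact hT ▸ List.getElem_mem hnT
        exact hrows row hmemT
      rw [pvScan_eq rows cols (PySem.List.pyRange 0 cols 1) (PySem.List.pyRange 0 rows 1)
        ((0 : Int), G) hV]
    · have hnil : PySem.List.pyRange 0 cols 1 = [] := PySem.List.pyRange_one_eq_nil (by omega)
      rw [hnil, pvInnerA_nil, pvInnerB_nil]
  · have hnil : PySem.List.pyRange 0 rows 1 = [] := PySem.List.pyRange_one_eq_nil (by omega)
    rw [hnil]
    rfl
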